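-- pv_equiv track=rewrite | github.com/MrBrantCode/unitest_baseline | mut_generate/mist_train_taco/taco_14819/solution.py | dashatize_number
-- ===== SOURCE A (Python) =====
-- def dashatize_number(num):
--     try:
--         # Convert the number to its absolute value and then to a string
--         num_str = str(abs(num))
--
--         # Use list comprehension to add dashes around odd digits
--         result = ''.join(['-' + i + '-' if int(i) % 2 else i for i in num_str])
--
--         # Replace double dashes with single dashes and strip any leading or trailing dashes
--         result = result.replace('--', '-').strip('-')
--
--         return result
--     except:
--         return 'None'
-- ===== SOURCE B (Python) =====
-- def dashatize_number(num):
--     try: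
--         s = str(abs(num))
--         out = [s[0]]
--         for prev, cur in zip(s, s[1:]):
--             if int(prev) % 2 or int(cur) % 2:
--                 out.append('-')
--             out.append(cur)
--         return ''.join(out)
--     except:
--         return 'None'
-- ===== Notes on version B (the rewrite author's own statement) =====
-- stated objective: simpler
-- what changed: Replaces A's wrap-every-odd-digit join followed by replace('--','-') and strip('-') with a single pass over adjacent digit pairs that emits each separator dash directly, so no double dashes or edge dashes are ever produced.
import Mathlib
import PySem

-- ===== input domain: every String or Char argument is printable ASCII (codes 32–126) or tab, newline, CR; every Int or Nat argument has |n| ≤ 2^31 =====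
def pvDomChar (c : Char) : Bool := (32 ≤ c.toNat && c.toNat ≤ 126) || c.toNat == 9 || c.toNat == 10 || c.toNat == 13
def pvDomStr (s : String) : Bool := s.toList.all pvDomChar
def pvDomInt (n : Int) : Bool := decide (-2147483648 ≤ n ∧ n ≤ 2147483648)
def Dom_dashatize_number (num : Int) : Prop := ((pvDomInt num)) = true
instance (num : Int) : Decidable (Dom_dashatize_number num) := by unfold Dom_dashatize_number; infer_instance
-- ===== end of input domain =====

-- B replaces A's wrap-every-odd-digit / replace('--','-') / strip('-') string pipeline by a single
-- scan over adjacent digit pairs that decides each separator directly (objective: simpler decomposition).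

-- ===== PORT A =====
-- '-' + i + '-' if int(i) % 2 else i   (int(i) can raise -> none, caught by the bare except)
def pvWrap? (c : Char) : Option (List Char) :=
  (PySem.Int.ofChars? [c]).map (fun v => if PySem.Int.mod v 2 ≠ 0 then ['-', c, '-'] else [c])

def dashatize_number (num : Int) : String :=
  let numStr := (PySem.Int.toStr ((num.natAbs : Int))).toList
  match numStr.mapM pvWrap? with
  | none => "None"
  | some parts =>
      String.mk (PySem.Chars.stripChars
        (PySem.Chars.replace (PySem.Chars.join [] parts) ['-', '-'] ['-']) ['-'])

-- ===== PORT B =====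
-- what one (prev, cur) loop iteration appends to out ('-' iff either neighbour is odd, then cur)
def pvSep? (prev cur : Char) : Option (List Char) := do
  let p ← PySem.Int.ofChars? [prev]
  let q ← PySem.Int.ofChars? [cur]
  pure (if PySem.Int.mod p 2 ≠ 0 ∨ PySem.Int.mod q 2 ≠ 0 then ['-', cur] else [cur])

def pvStep (acc : Option (List Char)) (pc : Char × Char) : Option (List Char) :=
  match acc with
  | none => none
  | some out => (pvSep? pc.1 pc.2).map (fun seg => out ++ seg)

def dashatize_number_alt (num : Int) : String :=
  let s := (PySem.Int.toStr ((num.natAbs : Int))).toList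
  match PySem.List.pyGet? s 0 with
  | none => "None"    -- s[0] raised IndexError, caught by the bare except (unreachable for int input)
  | some c0 =>
    match (s.zip (PySem.List.slice s (some 1) none)).foldl pvStep (some [c0]) with
    | none => "None"  -- int() raised, caught (unreachable: str(abs(num)) is all digits)
    | some out => String.mk (PySem.Chars.join [] (out.map (fun c => [c])))

-- ===== PRECONDITION & SPEC =====
def Spec_dashatize_number (num : Int) (out : String) : Prop := out = dashatize_number_alt num
instance (num : Int) (out : String) : Decidable (Spec_dashatize_number num out) := by unfold Spec_dashatize_number; infer_instance

-- ===== CLAIM (what is proved, stated in full; the proofs are below) =====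
def Claim_equal_dashatize_number : Prop := ∀ (num : Int), Dom_dashatize_number num → Spec_dashatize_number num (dashatize_number num)

-- ===== LEMMAS AND PROOFS =====

def pvDigits : List Char := ['0','1','2','3','4','5','6','7','8','9']
def pvOdd (c : Char) : Bool := (['1','3','5','7','9'] : List Char).contains c
def pvWrap (c : Char) : List Char := if pvOdd c then ['-', c, '-'] else [c]
def pvA (cs : List Char) : List Char := (cs.map pvWrap).flatten

def pvB : Char → List Char → List Char
  | _, [] => []
  | prev, c :: t => (if pvOdd prev || pvOdd c then ['-', c] else [c]) ++ pvB c t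

-- scan position right after digit `prev`'s own character has been emitted
def pvT (prev : Char) (rest : List Char) : List Char := (if pvOdd prev then ['-'] else []) ++ pvA rest
def pvE (prev : Char) (rest : List Char) : List Char :=
  pvB prev rest ++ (if pvOdd ((prev :: rest).getLast (List.cons_ne_nil _ _)) then ['-'] else [])

-- per-char facts ------------------------------------------------------------
lemma pvWrap?_eq (c : Char) (hc : c ∈ pvDigits) : pvWrap? c = some (pvWrap c) := by
  simp only [pvDigits, List.mem_cons, List.not_mem_nil, or_false] at hc
  rcases hc with rfl|rfl|rfl|rfl|rfl|rfl|rfl|rfl|rfl|rfl <;> decide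

lemma pvSep?_eq (p c : Char) (hp : p ∈ pvDigits) (hc : c ∈ pvDigits) :
    pvSep? p c = some (if pvOdd p || pvOdd c then ['-', c] else [c]) := by
  simp only [pvDigits, List.mem_cons, List.not_mem_nil, or_false] at hp hc
  rcases hp with rfl|rfl|rfl|rfl|rfl|rfl|rfl|rfl|rfl|rfl <;>
    rcases hc with rfl|rfl|rfl|rfl|rfl|rfl|rfl|rfl|rfl|rfl <;> decide

lemma pvDigit_ne_dash (c : Char) (hc : c ∈ pvDigits) : c ≠ '-' := by
  simp only [pvDigits, List.mem_cons, List.not_mem_nil, or_false] at hc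
  rcases hc with rfl|rfl|rfl|rfl|rfl|rfl|rfl|rfl|rfl|rfl <;> decide

-- the digits of str(abs(num)) ------------------------------------------------
lemma pv_digitChar_mem (m : Nat) : Nat.digitChar (m % 10) ∈ pvDigits := by
  have h : m % 10 < 10 := Nat.mod_lt _ (by norm_num)
  interval_cases h : m % 10 <;> decide

lemma pv_tdc_digits : ∀ (f n : Nat) (acc : List Char), (∀ c ∈ acc, c ∈ pvDigits) →
    ∀ c ∈ Nat.toDigitsCore 10 f n acc, c ∈ pvDigits := by
  intro f
  induction f with
  | zero => intro n acc hacc; simpa [Nat.toDigitsCore] using hacc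
  | succ f ih =>
    intro n acc hacc
    simp only [Nat.toDigitsCore]
    split
    · intro c hc
      rcases List.mem_cons.mp hc with rfl|hc
      · exact pv_digitChar_mem n
      · exact hacc c hc
    · exact ih _ _ (by
        intro c hc
        rcases List.mem_cons.mp hc with rfl|hc
        · exact pv_digitChar_mem n
        · exact hacc c hc)

lemma pv_tdc_ne_nil : ∀ (f n : Nat) (acc : List Char), acc ≠ [] →
    Nat.toDigitsCore 10 f n acc ≠ [] := by
  intro f
  induction f with
  | zero => intro n acc h; simpa [Nat.toDigitsCore] using h
  | succ f ih =>
    intro n acc h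
    simp only [Nat.toDigitsCore]
    split
    · simp
    · exact ih _ _ (by simp)

lemma pv_toDigits_digits (n : Nat) : ∀ c ∈ Nat.toDigits 10 n, c ∈ pvDigits :=
  pv_tdc_digits _ _ _ (by simp)

lemma pv_toDigits_ne_nil (n : Nat) : Nat.toDigits 10 n ≠ [] := by
  unfold Nat.toDigits
  simp only [Nat.toDigitsCore]
  split
  · simp
  · exact pv_tdc_ne_nil _ _ _ (by simp)

lemma pv_toChars_natAbs (num : Int) :
    PySem.Int.toChars ((num.natAbs : Int)) = Nat.toDigits 10 num.natAbs := by
  unfold PySem.Int.toChars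
  rw [if_neg (by omega : ¬ ((num.natAbs : Int) < 0))]
  rw [Int.toNat_natCast]

-- join with empty separator is flatten ---------------------------------------
lemma pv_join_nil_flatten (parts : List (List Char)) :
    PySem.Chars.join [] parts = parts.flatten := by
  induction parts with
  | nil => simp [PySem.Chars.join, List.intercalate]
  | cons x t ih =>
    cases t with
    | nil => simp [PySem.Chars.join, List.intercalate]
    | cons y t' =>
      simp only [PySem.Chars.join, List.intercalate] at ih ⊢
      simp [List.intersperse_cons₂, ih]

-- mapM over an all-digit list succeeds with pvWrap ---------------------------
lemma pv_mapM_wrap : ∀ (cs : List Char), (∀ c ∈ cs, c ∈ pvDigits) →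
    cs.mapM pvWrap? = some (cs.map pvWrap) := by
  intro cs
  induction cs with
  | nil => intro _; simp
  | cons c t ih =>
    intro h
    rw [List.mapM_cons, pvWrap?_eq c (h c (by simp)), ih (fun d hd => h d (by simp [hd]))]
    rfl

-- the replace('--','-') scan ------------------------------------------------
lemma pv_go_nil (f : Nat) (acc : List Char) :
    PySem.Chars.replace.go ['-','-'] ['-'] f [] acc = acc.reverse := by
  cases f <;> rw [PySem.Chars.replace.go.eq_def] <;> simp

lemma pv_go_nomatch (f : Nat) (c : Char) (t acc : List Char)
    (h : (['-','-'] : List Char).isPrefixOf (c :: t) = false) :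
    PySem.Chars.replace.go ['-','-'] ['-'] (f+1) (c :: t) acc =
      PySem.Chars.replace.go ['-','-'] ['-'] f t (c :: acc) := by
  rw [PySem.Chars.replace.go.eq_def]; simp [h]

lemma pv_go_match (f : Nat) (t acc : List Char) :
    PySem.Chars.replace.go ['-','-'] ['-'] (f+1) ('-' :: '-' :: t) acc =
      PySem.Chars.replace.go ['-','-'] ['-'] f t ('-' :: acc) := by
  rw [PySem.Chars.replace.go.eq_def]
  simp [List.isPrefixOf]

lemma pv_nomatch_digit (c : Char) (t : List Char) (hc : c ≠ '-') :
    (['-','-'] : List Char).isPrefixOf (c :: t) = false := by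
  simp [List.isPrefixOf]
  exact fun h => absurd h.symm hc

lemma pv_nomatch_dash_digit (c : Char) (t : List Char) (hc : c ≠ '-') :
    (['-','-'] : List Char).isPrefixOf ('-' :: c :: t) = false := by
  simp [List.isPrefixOf]
  exact fun h => absurd h.symm hc

lemma pv_go_T : ∀ (rest : List Char) (prev : Char) (acc : List Char) (f : Nat),
    prev ∈ pvDigits → (∀ c ∈ rest, c ∈ pvDigits) → (pvT prev rest).length ≤ f →
    PySem.Chars.replace.go ['-','-'] ['-'] f (pvT prev rest) acc = acc.reverse ++ pvE prev rest := by
  intro rest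
  induction rest with
  | nil =>
    intro prev acc f _ _ hf
    by_cases hop : pvOdd prev = true
    · have e : pvT prev [] = ['-'] := by simp [pvT, pvA, hop]
      rw [e] at hf ⊢
      obtain ⟨f', rfl⟩ : ∃ f', f = f' + 1 := ⟨f - 1, by simp at hf; omega⟩
      rw [pv_go_nomatch _ _ _ _ (by decide), pv_go_nil]
      simp [pvE, pvB, hop]
    · have e : pvT prev [] = [] := by simp [pvT, pvA, hop]
      rw [e, pv_go_nil]
      simp [pvE, pvB, hop]
  | cons c t ih =>
    intro prev acc f _ h hf
    have hc : c ∈ pvDigits := h c (by simp)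
    have ht : ∀ d ∈ t, d ∈ pvDigits := fun d hd => h d (by simp [hd])
    have hcd : c ≠ '-' := pvDigit_ne_dash c hc
    by_cases hop : pvOdd prev = true <;> by_cases hoc : pvOdd c = true
    · -- both odd: '-'::'-'::c::'-'::pvA t, the "--" is replaced
      have e : pvT prev (c :: t) = '-' :: '-' :: c :: '-' :: pvA t := by
        simp [pvT, pvA, pvWrap, hop, hoc]
      rw [e] at hf ⊢
      simp only [List.length_cons] at hf
      obtain ⟨f', rfl⟩ : ∃ f', f = f' + 1 + 1 := ⟨f - 2, by omega⟩
      rw [pv_go_match, pv_go_nomatch _ _ _ _ (pv_nomatch_digit c _ hcd)]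
      have e2 : '-' :: pvA t = pvT c t := by simp [pvT, hoc]
      rw [e2, ih c _ f' hc ht (by simp [pvT, hoc]; omega)]
      simp [pvE, pvB, hop, hoc, List.getLast_cons]
    · -- prev odd, c even: '-'::c::pvA t
      have e : pvT prev (c :: t) = '-' :: c :: pvA t := by
        simp [pvT, pvA, pvWrap, hop, hoc]
      rw [e] at hf ⊢
      simp only [List.length_cons] at hf
      obtain ⟨f', rfl⟩ : ∃ f', f = f' + 1 + 1 := ⟨f - 2, by omega⟩
      rw [pv_go_nomatch _ _ _ _ (pv_nomatch_dash_digit c _ hcd),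
          pv_go_nomatch _ _ _ _ (pv_nomatch_digit c _ hcd)]
      have e2 : pvA t = pvT c t := by simp [pvT, hoc]
      rw [e2, ih c _ f' hc ht (by simp [pvT, hoc]; omega)]
      simp [pvE, pvB, hop, hoc, List.getLast_cons]
    · -- prev even, c odd: '-'::c::'-'::pvA t (single dash before c stays)
      have e : pvT prev (c :: t) = '-' :: c :: '-' :: pvA t := by
        simp [pvT, pvA, pvWrap, hop, hoc]
      rw [e] at hf ⊢
      simp only [List.length_cons] at hf
      obtain ⟨f', rfl⟩ : ∃ f', f = f' + 1 + 1 := ⟨f - 2, by omega⟩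
      rw [pv_go_nomatch _ _ _ _ (pv_nomatch_dash_digit c _ hcd),
          pv_go_nomatch _ _ _ _ (pv_nomatch_digit c _ hcd)]
      have e2 : '-' :: pvA t = pvT c t := by simp [pvT, hoc]
      rw [e2, ih c _ f' hc ht (by simp [pvT, hoc]; omega)]
      simp [pvE, pvB, hop, hoc, List.getLast_cons]
    · -- both even: c::pvA t
      have e : pvT prev (c :: t) = c :: pvA t := by
        simp [pvT, pvA, pvWrap, hop, hoc]
      rw [e] at hf ⊢
      simp only [List.length_cons] at hf
      obtain ⟨f', rfl⟩ : ∃ f', f = f' + 1 := ⟨f - 1, by omega⟩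
      rw [pv_go_nomatch _ _ _ _ (pv_nomatch_digit c _ hcd)]
      have e2 : pvA t = pvT c t := by simp [pvT, hoc]
      rw [e2, ih c _ f' hc ht (by simp [pvT, hoc]; omega)]
      simp [pvE, pvB, hop, hoc, List.getLast_cons]

lemma pv_replace_eq (c0 : Char) (rest : List Char)
    (h0 : c0 ∈ pvDigits) (hr : ∀ c ∈ rest, c ∈ pvDigits) :
    PySem.Chars.replace (pvA (c0 :: rest)) ['-','-'] ['-'] =
      (if pvOdd c0 then ['-'] else []) ++ c0 :: pvE c0 rest := by
  have hcd : c0 ≠ '-' := pvDigit_ne_dash c0 h0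
  simp only [PySem.Chars.replace, List.isEmpty_cons, Bool.false_eq_true, if_false]
  by_cases hodd0 : pvOdd c0 = true
  · have e : pvA (c0 :: rest) = '-' :: c0 :: pvT c0 rest := by
      simp [pvT, pvA, pvWrap, hodd0]
    rw [e]
    simp only [List.length_cons]
    rw [pv_go_nomatch _ _ _ _ (pv_nomatch_dash_digit c0 _ hcd),
        pv_go_nomatch _ _ _ _ (pv_nomatch_digit c0 _ hcd),
        pv_go_T rest c0 _ _ h0 hr (by omega)]
    simp [hodd0]
  · have e : pvA (c0 :: rest) = c0 :: pvT c0 rest := by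
      simp [pvT, pvA, pvWrap, hodd0]
    rw [e]
    simp only [List.length_cons]
    rw [pv_go_nomatch _ _ _ _ (pv_nomatch_digit c0 _ hcd),
        pv_go_T rest c0 _ _ h0 hr (by omega)]
    simp [hodd0]

-- the strip('-') ------------------------------------------------------------
lemma pv_lastB : ∀ (rest : List Char) (prev : Char), prev ∈ pvDigits → (∀ c ∈ rest, c ∈ pvDigits) →
    ∃ init d, prev :: pvB prev rest = init ++ [d] ∧ d ∈ pvDigits := by
  intro rest
  induction rest with
  | nil => intro prev hp _; exact ⟨[], prev, by simp [pvB], hp⟩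
  | cons c t ih =>
    intro prev hp h
    obtain ⟨init, d, he, hd⟩ := ih c (h c (by simp)) (fun x hx => h x (by simp [hx]))
    refine ⟨prev :: (if pvOdd prev || pvOdd c then ['-'] else []) ++ init, d, ?_, hd⟩
    by_cases hs : (pvOdd prev || pvOdd c) = true <;>
      simp [pvB, hs, ← he]

lemma pv_strip_eq (c0 : Char) (rest : List Char)
    (h0 : c0 ∈ pvDigits) (hr : ∀ c ∈ rest, c ∈ pvDigits) :
    PySem.Chars.stripChars ((if pvOdd c0 then ['-'] else []) ++ c0 :: pvE c0 rest) ['-'] =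
      c0 :: pvB c0 rest := by
  have hcd : c0 ≠ '-' := pvDigit_ne_dash c0 h0
  obtain ⟨init, d, he, hd⟩ := pv_lastB rest c0 h0 hr
  have hdd : d ≠ '-' := pvDigit_ne_dash d hd
  have hE : c0 :: pvE c0 rest =
      (init ++ [d]) ++ (if pvOdd ((c0 :: rest).getLast (List.cons_ne_nil _ _)) then ['-'] else []) := by
    simp [pvE, ← he]
  simp only [PySem.Chars.stripChars]
  have step1 :
      List.dropWhile (fun c => (['-'] : List Char).contains c)
        ((if pvOdd c0 then ['-'] else []) ++ c0 :: pvE c0 rest) = c0 :: pvE c0 rest := by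
    by_cases hodd0 : pvOdd c0 = true <;> simp [hodd0, hcd]
  rw [step1, hE]
  by_cases htr : pvOdd ((c0 :: rest).getLast (List.cons_ne_nil _ _)) = true
  · rw [if_pos htr]
    rw [show (init ++ [d] ++ ['-']).reverse = '-' :: d :: init.reverse by simp]
    rw [List.dropWhile_cons_of_pos (by decide), List.dropWhile_cons_of_neg (by simp [hdd])]
    rw [he]; simp
  · rw [if_neg htr]
    rw [show (init ++ [d] ++ ([] : List Char)).reverse = d :: init.reverse by simp]
    rw [List.dropWhile_cons_of_neg (by simp [hdd])]
    rw [he]; simp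

-- the B-side fold ------------------------------------------------------------
lemma pv_foldB : ∀ (rest : List Char) (prev : Char) (out : List Char),
    prev ∈ pvDigits → (∀ c ∈ rest, c ∈ pvDigits) →
    List.foldl pvStep (some out) ((prev :: rest).zip rest) = some (out ++ pvB prev rest) := by
  intro rest
  induction rest with
  | nil => intro prev out _ _; simp [pvB]
  | cons c t ih =>
    intro prev out hp h
    have hc : c ∈ pvDigits := h c (by simp)
    have step : pvStep (some out) (prev, c) =
        some (out ++ (if pvOdd prev || pvOdd c then ['-', c] else [c])) := by
      simp [pvStep, pvSep?_eq prev c hp hc]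
    simp only [List.zip_cons_cons, List.foldl_cons, step]
    rw [ih c _ hc (fun d hd => h d (by simp [hd]))]
    simp [pvB, List.append_assoc]

-- ===== VERDICT (by name: the statement is the Claim_ definition above) =====
theorem dashatize_number_spec : Claim_equal_dashatize_number := by
  intro num _
  unfold Spec_dashatize_number dashatize_number dashatize_number_alt
  have hts : (PySem.Int.toStr ((num.natAbs : Int))).toList = Nat.toDigits 10 num.natAbs := by
    rw [PySem.Int.toList_toStr, pv_toChars_natAbs]
  obtain ⟨c0, rest, hds⟩ : ∃ c0 rest, Nat.toDigits 10 num.natAbs = c0 :: rest := by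
    cases hnil : Nat.toDigits 10 num.natAbs with
    | nil => exact absurd hnil (pv_toDigits_ne_nil _)
    | cons a l => exact ⟨a, l, rfl⟩
  have hd : ∀ c ∈ c0 :: rest, c ∈ pvDigits := by
    rw [← hds]; exact pv_toDigits_digits num.natAbs
  have h0 : c0 ∈ pvDigits := hd c0 (by simp)
  have hr : ∀ c ∈ rest, c ∈ pvDigits := fun c hc => hd c (by simp [hc])
  simp only [hts, hds]
  -- side A
  rw [pv_mapM_wrap _ hd]
  simp only []
  rw [pv_join_nil_flatten]
  have hA : ((c0 :: rest).map pvWrap).flatten = pvA (c0 :: rest) := rfl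
  rw [hA, pv_replace_eq c0 rest h0 hr, pv_strip_eq c0 rest h0 hr]
  -- side B
  have hget : PySem.List.pyGet? (c0 :: rest) (0 : Int) = some c0 := by
    simp [pysem]
  have hslice : PySem.List.slice (c0 :: rest) (some (1 : Int)) none = rest := by
    rw [PySem.List.slice_from _ (by norm_num : (0:Int) ≤ 1)]
    simp
  rw [hget, hslice]
  simp only []
  rw [pv_foldB rest c0 [c0] h0 hr]
  simp only []
  have hjoin : PySem.Chars.join [] (([c0] ++ pvB c0 rest).map (fun c => [c])) = c0 :: pvB c0 rest := by
    simpa using PySem.Chars.join_nil_singletons (c0 :: pvB c0 rest)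
  rw [hjoin]
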